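-- pv_equiv track=rewrite | github.com/HudsonPryde/leetcode-daily | 2024-09/cafeteria.py | getMaxAdditionalDinersCount
-- ===== SOURCE A (Python) =====
-- from typing import List
--
-- def getMaxAdditionalDinersCount(N: int, K: int, M: int, S: List[int]) -> int:
--     # Sort the list of existing diners
--     S.sort()
--
--     # Count how many additional diners we can fit
--     additional_diners = 0
--
--     # 1. Check the gap before the first diner
--     first_gap = S[0] - 1
--     if first_gap > 0:
--         additional_diners += first_gap // (K + 1)
--
--     # 2. Check the gaps between diners
--     for i in range(1, M):
--         gap = S[i] - S[i - 1] - 1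
--         if gap > 0:
--             additional_diners += (gap - K) // (K + 1) if gap > K else 0
--
--     # 3. Check the gap after the last diner
--     last_gap = N - S[-1]
--     if last_gap > 0:
--         additional_diners += last_gap // (K + 1)
--
--     return additional_diners
-- ===== SOURCE B (Python) =====
-- from typing import List
--
-- def getMaxAdditionalDinersCount(N: int, K: int, M: int, S: List[int]) -> int:
--     # Blocked-interval view: diner s blocks the seats [s - K, s + K].  Merge the
--     # blocked intervals of the M diners (sorted), sum the capacity of every free run
--     # strictly between two blocked runs, and add the two free runs at the row ends,
--     # next to the nearest and the farthest diner; a free run of L seats holds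
--     # (L + K) // (K + 1) additional diners.
--     S.sort()
--
--     def cap(L):
--         return (L + K) // (K + 1) if L > 0 else 0
--
--     blocked = []
--     for i in range(M):
--         s = S[i]
--         if blocked and s - K <= blocked[-1][1] + 1:
--             blocked[-1][1] = max(blocked[-1][1], s + K)
--         else:
--             blocked.append([s - K, s + K])
--     interior = sum(cap(l2 - 1 - h1) for (l1, h1), (l2, h2) in zip(blocked, blocked[1:]))
--     return cap(S[0] - (K + 1)) + interior + cap(N - S[-1] - K)
-- ===== Notes on version B (the rewrite author's own statement) =====
-- stated objective: alternative
-- what changed: B recasts the task as interval merging: each diner blocks the seats [s-K, s+K]; the blocked intervals of the M sorted diners are merged into maximal runs, the free runs strictly between adjacent merged runs are summed with the capacity formula (L+K)//(K+1), and the two row-end runs next to the nearest and farthest diner are added with the same formula - a different intermediate structure (a merged interval-run list) and a single capacity formula in place of A's three-case gap scan. …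
-- outside the precondition, e.g. on getMaxAdditionalDinersCount(10, -3, 2, [2, 3]): A returns -5, B returns -7
import Mathlib
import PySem

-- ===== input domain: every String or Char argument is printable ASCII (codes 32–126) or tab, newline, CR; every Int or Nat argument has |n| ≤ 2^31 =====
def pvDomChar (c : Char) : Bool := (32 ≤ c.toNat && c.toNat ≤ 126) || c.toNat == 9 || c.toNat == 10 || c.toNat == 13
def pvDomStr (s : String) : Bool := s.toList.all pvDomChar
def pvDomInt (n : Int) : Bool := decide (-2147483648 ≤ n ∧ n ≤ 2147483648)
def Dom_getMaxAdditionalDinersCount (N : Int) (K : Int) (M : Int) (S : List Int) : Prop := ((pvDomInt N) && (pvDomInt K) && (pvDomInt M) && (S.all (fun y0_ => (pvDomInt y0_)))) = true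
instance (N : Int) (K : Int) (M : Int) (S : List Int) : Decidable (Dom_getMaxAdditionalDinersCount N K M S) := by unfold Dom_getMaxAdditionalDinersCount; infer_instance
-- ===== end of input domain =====

-- B replaces A's three-case gap scan by interval merging: each diner blocks [s-K, s+K], the merged
-- blocked runs are built over the sorted diners, and each free run of L seats adds (L+K)//(K+1)
-- (objective: alternative). Both sort S in place; the equivalence proved is about the RETURN value.


-- ===== PORT A =====
def getMaxAdditionalDinersCount (N : Int) (K : Int) (M : Int) (S : List Int) : Int :=
  -- S.sort() sorts in place; all later reads see the sorted list
  let T := PySem.List.sorted S (fun x => x) false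
  -- 1. gap before the first diner (S[0]; default never reached under Pre_)
  let firstGap := PySem.List.pyGetD T 0 0 - 1
  let acc0 : Int := if firstGap > 0 then PySem.Int.floordiv firstGap (K + 1) else 0
  -- 2. for i in range(1, M): gaps between diners
  let acc1 := (PySem.List.pyRange 1 M).foldl (fun acc i =>
    let gap := PySem.List.pyGetD T i 0 - PySem.List.pyGetD T (i - 1) 0 - 1
    if gap > 0 then acc + (if gap > K then PySem.Int.floordiv (gap - K) (K + 1) else 0) else acc) acc0
  -- 3. gap after the last diner (S[-1])
  let lastGap := N - PySem.List.pyGetD T (-1) 0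
  if lastGap > 0 then acc1 + PySem.Int.floordiv lastGap (K + 1) else acc1

-- ===== PORT B =====
-- cap(L): max diners in a run of L free seats with spacing K+1
def pvCap (K L : Int) : Int := if L > 0 then PySem.Int.floordiv (L + K) (K + 1) else 0

-- loop body of B's merge pass: extend the last blocked run or open a new one
def pvBStep (K : Int) (b : List (Int × Int)) (s : Int) : List (Int × Int) :=
  match b.getLast? with
  | some (lo, hi) =>
      if s - K ≤ hi + 1 then b.dropLast ++ [(lo, max hi (s + K))] else b ++ [(s - K, s + K)]
  | none => [(s - K, s + K)]

def getMaxAdditionalDinersCount_alt (N : Int) (K : Int) (M : Int) (S : List Int) : Int :=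
  let T := PySem.List.sorted S (fun x => x) false
  -- for i in range(M): merge the blocked interval [S[i]-K, S[i]+K] into the run list
  let blocked := (PySem.List.pyRange 0 M).foldl
    (fun b i => pvBStep K b (PySem.List.pyGetD T i 0)) []
  -- sum(cap(l2 - 1 - h1) for (l1, h1), (l2, h2) in zip(blocked, blocked[1:]))
  let interior := ((blocked.zip blocked.tail).map (fun q => pvCap K (q.2.1 - 1 - q.1.2))).sum
  -- cap(S[0] - (K + 1)) + interior + cap(N - S[-1] - K)
  pvCap K (PySem.List.pyGetD T 0 0 - (K + 1)) + interior
    + pvCap K (N - PySem.List.pyGetD T (-1) 0 - K)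

-- ===== PRECONDITION & SPEC =====
-- Pre_ excludes: empty S and M > len(S), on which A raises IndexError; and K < 0, an invalid
-- seat distance outside the function's purpose (K = -1 even divides by zero in A).
def Pre_getMaxAdditionalDinersCount (N : Int) (K : Int) (M : Int) (S : List Int) : Prop :=
  S ≠ [] ∧ M ≤ (S.length : Int) ∧ 0 ≤ K
instance (N : Int) (K : Int) (M : Int) (S : List Int) : Decidable (Pre_getMaxAdditionalDinersCount N K M S) := by unfold Pre_getMaxAdditionalDinersCount; infer_instance

def pvWitness_getMaxAdditionalDinersCount : Int × Int × Int × List Int := (10, 1, 2, [2, 6])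

def Spec_getMaxAdditionalDinersCount (N : Int) (K : Int) (M : Int) (S : List Int) (out : Int) : Prop := out = getMaxAdditionalDinersCount_alt N K M S
instance (N : Int) (K : Int) (M : Int) (S : List Int) (out : Int) : Decidable (Spec_getMaxAdditionalDinersCount N K M S out) := by unfold Spec_getMaxAdditionalDinersCount; infer_instance

-- ===== CLAIM (what is proved, stated in full; the proofs are below) =====
def Claim_equal_getMaxAdditionalDinersCount : Prop := ∀ (N : Int) (K : Int) (M : Int) (S : List Int), Dom_getMaxAdditionalDinersCount N K M S → Pre_getMaxAdditionalDinersCount N K M S → Spec_getMaxAdditionalDinersCount N K M S (getMaxAdditionalDinersCount N K M S)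

-- ===== LEMMAS AND PROOFS =====

-- A's per-gap contribution between consecutive diners p < c
def pvG (K p c : Int) : Int :=
  if c - p - 1 > K then PySem.Int.floordiv (c - p - 1 - K) (K + 1) else 0

-- sum of pvG over consecutive pairs of the chain p :: r
def pvGsum (K : Int) : Int → List Int → Int
  | _, [] => 0
  | p, c :: r => pvG K p c + pvGsum K c r

-- recursive form of B's interior sum over adjacent blocked runs
def pvInt (K : Int) : List (Int × Int) → Int
  | [] => 0
  | [_] => 0
  | a :: b :: l => pvCap K (b.1 - 1 - a.2) + pvInt K (b :: l)

lemma pv_fd0 {a b : Int} (h0 : 0 ≤ a) (h1 : a < b) : PySem.Int.floordiv a b = 0 := by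
  rw [PySem.Int.floordiv_eq_ediv_of_pos (by omega)]
  exact Int.ediv_eq_zero_of_lt h0 h1

-- A's boundary formula = B's capacity of the clipped free run
lemma pv_edge (K x : Int) (hK : 0 ≤ K) :
    (if x > 0 then PySem.Int.floordiv x (K + 1) else 0) = pvCap K (x - K) := by
  unfold pvCap
  have hx : x - K + K = x := by ring
  rw [hx]
  by_cases h1 : x - K > 0
  · rw [if_pos h1, if_pos (by omega)]
  · rw [if_neg h1]
    by_cases h2 : x > 0
    · rw [if_pos h2, pv_fd0 (by omega) (by omega)]
    · rw [if_neg h2]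

-- zip-with-tail sum = chain sum (A's middle pairs)
lemma pv_gsum_eq (K : Int) : ∀ (p : Int) (r : List Int),
    (((p :: r).zip r).map (fun q => pvG K q.1 q.2)).sum = pvGsum K p r := by
  intro p r
  induction r generalizing p with
  | nil => simp [pvGsum]
  | cons c r ih => simp [List.zip_cons_cons, pvGsum, ih c]

-- zip-with-tail sum = recursive interior sum (B's generator expression)
lemma pv_int_eq (K : Int) : ∀ (b : List (Int × Int)),
    ((b.zip b.tail).map (fun q => pvCap K (q.2.1 - 1 - q.1.2))).sum = pvInt K b := by
  intro b
  induction b with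
  | nil => simp [pvInt]
  | cons a l ih =>
      cases l with
      | nil => simp [pvInt]
      | cons c r => simp [List.zip_cons_cons, pvInt, ← ih]

-- appending a run adds one adjacent-pair term (and pvInt ignores the last run's hi)
lemma pv_int_concat (K : Int) : ∀ (b : List (Int × Int)) (x : Int × Int),
    pvInt K (b ++ [x]) = pvInt K b + (b.getLast?.elim 0 (fun y => pvCap K (x.1 - 1 - y.2))) := by
  intro b
  induction b with
  | nil => simp [pvInt]
  | cons a l ih =>
      intro x
      cases l with
      | nil => simp [pvInt]
      | cons c r =>
          have := ih (x := x)
          simp only [List.cons_append, pvInt, List.getLast?_cons_cons] at *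
          rw [this]
          ring

-- index-pair traversal = zip-with-tail traversal
lemma mid_index_eq (T : List Int) (F : Int → Int → Int) :
    (List.range (T.length - 1)).map (fun k => F (T.getD k 0) (T.getD (k + 1) 0)) =
      (T.zip T.tail).map (fun p => F p.1 p.2) := by
  induction T with
  | nil => simp
  | cons a t ih =>
      cases t with
      | nil => simp
      | cons b r =>
          have ih' := ih
          simp only [List.length_cons, Nat.add_sub_cancel, List.tail_cons] at ih'
          simp only [List.length_cons, Nat.add_sub_cancel, List.range_succ_eq_map,
            List.map_cons, List.map_map, List.tail_cons, List.zip_cons_cons]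
          refine congrArg₂ List.cons (by simp) ?_
          rw [← ih']
          refine List.map_congr_left fun k _ => ?_
          simp [Function.comp, Nat.succ_eq_add_one]

-- an index loop reading T[i] for i in range(m) is a fold over T.take m
lemma pv_foldl_range_getD {β : Type} (f : β → Int → β) (T : List Int) :
    ∀ (m : Nat), m ≤ T.length → ∀ (init : β),
      (List.range m).foldl (fun b k => f b (T.getD k 0)) init = (T.take m).foldl f init := by
  intro m
  induction m with
  | zero => intro _ init; simp
  | succ m ih =>
      intro hm init
      rw [List.range_succ, List.foldl_append, ih (by omega) init]
      have hg : T[m]? = some T[m] := List.getElem?_eq_getElem (by omega)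
      have ht : T.take (m + 1) = T.take m ++ [T[m]] := by rw [List.take_add_one, hg]; rfl
      rw [ht, List.foldl_append]
      simp [List.getD, hg]

-- invariant of B's merge pass over a sorted chain: each further diner either extends the last
-- blocked run (contributing pvG = 0) or opens a new run (contributing its pvG gap term)
lemma pv_bmain (K : Int) (hK : 0 ≤ K) (rest : List Int) :
    ∀ (b0 : List (Int × Int)) (lo p : Int),
      (p :: rest).Pairwise (· ≤ ·) →
      pvInt K (rest.foldl (pvBStep K) (b0 ++ [(lo, p + K)]))
        = pvInt K (b0 ++ [(lo, p + K)]) + pvGsum K p rest := by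
  induction rest with
  | nil =>
      intro b0 lo p _
      simp [pvGsum]
  | cons c r ih =>
      intro b0 lo p hch
      rcases List.pairwise_cons.mp hch with ⟨hpall, hch'⟩
      have hpc : p ≤ c := hpall c (List.mem_cons_self ..)
      have hlast : (b0 ++ [(lo, p + K)]).getLast? = some (lo, p + K) := by simp
      have hdrop : (b0 ++ [(lo, p + K)]).dropLast = b0 := by simp
      rw [List.foldl_cons]
      by_cases hm : c - K ≤ (p + K) + 1
      · have hstep : pvBStep K (b0 ++ [(lo, p + K)]) c = b0 ++ [(lo, c + K)] := by
          simp only [pvBStep, hlast, hdrop]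
          rw [if_pos hm, max_eq_right (by omega : p + K ≤ c + K)]
        rw [hstep, ih b0 lo c hch']
        have hG : pvG K p c = 0 := by
          unfold pvG
          by_cases hg : c - p - 1 > K
          · rw [if_pos hg, pv_fd0 (by omega) (by omega)]
          · rw [if_neg hg]
        rw [pv_int_concat, pv_int_concat, pvGsum, hG]
        ring
      · have hstep : pvBStep K (b0 ++ [(lo, p + K)]) c
            = (b0 ++ [(lo, p + K)]) ++ [(c - K, c + K)] := by
          simp only [pvBStep, hlast]
          rw [if_neg hm]
        rw [hstep, ih (b0 ++ [(lo, p + K)]) (c - K) c hch', pv_int_concat, hlast]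
        have hcap : pvCap K (c - K - 1 - (p + K)) = pvG K p c := by
          unfold pvCap pvG
          rw [if_pos (by omega : c - K - 1 - (p + K) > 0), if_pos (by omega : c - p - 1 > K)]
          congr 1
          ring
        simp only [Option.elim_some, hcap, pvGsum]
        ring

-- ===== VERDICT (by name: the statement is the Claim_ definition above) =====
theorem getMaxAdditionalDinersCount_spec : Claim_equal_getMaxAdditionalDinersCount := by
  intro N K M S _ hpre
  obtain ⟨hS, hM, hK⟩ := hpre
  unfold Spec_getMaxAdditionalDinersCount getMaxAdditionalDinersCount getMaxAdditionalDinersCount_alt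
  set T := PySem.List.sorted S (fun x => x) false with hTdef
  have hTlen : T.length = S.length := (PySem.List.sorted_perm S (fun x => x) false).length_eq
  have hTne : T ≠ [] := by
    intro h
    apply hS
    rw [h] at hTlen
    exact List.length_eq_zero_iff.mp hTlen.symm
  obtain ⟨t0, rest, hT⟩ := List.exists_cons_of_ne_nil hTne
  have hpair : T.Pairwise (· ≤ ·) := PySem.List.sorted_pairwise S (fun x => x)
  rw [hT] at hpair
  set m : Nat := M.toNat with hm
  have hmlen : m ≤ T.length := by omega
  -- B's merge loop = fold over the first m sorted diners
  have hloop : (PySem.List.pyRange 0 M).foldl (fun b i => pvBStep K b (PySem.List.pyGetD T i 0)) []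
      = (T.take m).foldl (pvBStep K) [] := by
    by_cases hM0 : M ≤ 0
    · rw [PySem.List.pyRange_one_eq_nil hM0]
      have : m = 0 := by omega
      simp [this]
    · have hMm : M = ((m : Nat) : Int) := by omega
      rw [hMm, PySem.List.pyRange_zero_nat, List.foldl_map]
      simp only [PySem.List.pyGetD_natCast]
      exact pv_foldl_range_getD (pvBStep K) T m hmlen []
  -- B's interior sum = pvGsum over the chain of the first m sorted diners
  have hint : pvInt K ((T.take m).foldl (pvBStep K) [])
      = pvGsum K t0 ((T.take m).tail) := by
    by_cases hm0 : m = 0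
    · simp [hm0, pvInt, pvGsum]
    · have hcons : T.take m = t0 :: rest.take (m - 1) := by
        rw [hT]
        have hmm : m = (m - 1) + 1 := by omega
        rw [hmm, List.take_succ_cons]
        simp
      rw [hcons, List.foldl_cons, List.tail_cons]
      have h0 : pvBStep K [] t0 = [] ++ [(t0 - K, t0 + K)] := by simp [pvBStep]
      have hsub : (t0 :: rest.take (m - 1)).Pairwise (· ≤ ·) :=
        List.Pairwise.sublist (List.Sublist.cons₂ t0 (List.take_sublist ..)) hpair
      rw [h0, pv_bmain K hK (rest.take (m - 1)) [] (t0 - K) t0 hsub]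
      simp [pvInt]
  -- A side: step function = accumulation of pvG
  have hAfun : (fun (acc : Int) (i : Int) =>
      if PySem.List.pyGetD T i 0 - PySem.List.pyGetD T (i - 1) 0 - 1 > 0 then
        acc + (if PySem.List.pyGetD T i 0 - PySem.List.pyGetD T (i - 1) 0 - 1 > K then
          PySem.Int.floordiv (PySem.List.pyGetD T i 0 - PySem.List.pyGetD T (i - 1) 0 - 1 - K) (K + 1) else 0)
      else acc)
      = fun acc i => acc + pvG K (PySem.List.pyGetD T (i - 1) 0) (PySem.List.pyGetD T i 0) := by
    funext acc i
    simp only [pvG]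
    by_cases h0 : PySem.List.pyGetD T i 0 - PySem.List.pyGetD T (i - 1) 0 - 1 > 0
    · rw [if_pos h0]
    · have hk : ¬ PySem.List.pyGetD T i 0 - PySem.List.pyGetD T (i - 1) 0 - 1 > K := by omega
      rw [if_neg h0, if_neg hk, add_zero]
  simp only [hAfun, PySem.List.foldl_add, hloop]
  rw [pv_int_eq K, hint]
  -- A's middle sum = pvGsum over the same chain
  have hmid : ((PySem.List.pyRange 1 M).map
      (fun i => pvG K (PySem.List.pyGetD T (i - 1) 0) (PySem.List.pyGetD T i 0))).sum
      = pvGsum K t0 ((T.take m).tail) := by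
    by_cases hM1 : M ≤ 1
    · rw [PySem.List.pyRange_one_eq_nil hM1]
      have hm1 : m ≤ 1 := by omega
      have htail : (T.take m).tail = [] := by
        rcases Nat.le_one_iff_eq_zero_or_eq_one.mp hm1 with h | h
        · simp [h]
        · rw [h, hT, List.take_succ_cons, List.tail_cons, List.take_zero]
      rw [htail]
      simp [pvGsum]
    · have hMm : M = ((m : Nat) : Int) := by omega
      have hcons : T.take m = t0 :: rest.take (m - 1) := by
        rw [hT]
        have hmm : m = (m - 1) + 1 := by omega
        rw [hmm, List.take_succ_cons]
        simp
      have hPlen : (T.take m).length = m := List.length_take_of_le hmlen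
      have hPgetD : ∀ k : Nat, k < m → (T.take m).getD k 0 = T.getD k 0 := by
        intro k hk
        simp [List.getD, hk]
      rw [PySem.List.pyRange_one, hMm]
      have htn : (((m : Nat) : Int) - 1).toNat = m - 1 := by omega
      rw [htn, List.map_map]
      have hzip : (List.range (m - 1)).map
          ((fun i => pvG K (PySem.List.pyGetD T (i - 1) 0) (PySem.List.pyGetD T i 0))
            ∘ (fun k : Nat => (1 : Int) + k))
          = ((T.take m).zip (T.take m).tail).map (fun p => (fun a b => pvG K a b) p.1 p.2) := by
        rw [← mid_index_eq (T.take m) (fun a b => pvG K a b), hPlen]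
        refine List.map_congr_left fun k hk => ?_
        have hkm : k < m - 1 := List.mem_range.mp hk
        have h1 : (1 : Int) + k = ((k + 1 : Nat) : Int) := by push_cast; ring
        have h2 : ((k + 1 : Nat) : Int) - 1 = ((k : Nat) : Int) := by push_cast; ring
        simp only [Function.comp, h1, h2, PySem.List.pyGetD_natCast]
        rw [hPgetD k (by omega), hPgetD (k + 1) (by omega)]
      rw [hzip, hcons, List.tail_cons]
      exact pv_gsum_eq K t0 (rest.take (m - 1))
  rw [hmid]
  -- boundary terms via pv_edge
  have hfirst : (if PySem.List.pyGetD T 0 0 - 1 > 0 then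
        PySem.Int.floordiv (PySem.List.pyGetD T 0 0 - 1) (K + 1) else 0)
      = pvCap K (PySem.List.pyGetD T 0 0 - (K + 1)) := by
    rw [pv_edge K (PySem.List.pyGetD T 0 0 - 1) hK]
    congr 1
    ring
  rw [hfirst]
  by_cases hL : N - PySem.List.pyGetD T (-1) 0 > 0
  · rw [if_pos hL]
    have := pv_edge K (N - PySem.List.pyGetD T (-1) 0) hK
    rw [if_pos hL] at this
    rw [this]
  · rw [if_neg hL]
    have := pv_edge K (N - PySem.List.pyGetD T (-1) 0) hK
    rw [if_neg hL] at this
    rw [← this]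
    ring
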